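-- pv_equiv track=rewrite | github.com/brainyvoyage/deleet | python/geeks/all_posssible_str_space.py | space_pattern
-- ===== SOURCE A (Python) =====
-- def get_pattern(input_str, pattern):
--     assert (len(input_str) == len(pattern))
--
--     res = ''
--     for i in range(len(pattern)):
--         if pattern[i] == '1':
--             res += input_str[i] + ' '
--         else:
--             res += input_str[i]
--     return res
--
-- def space_pattern(input_str):
--     result = []
--     result.append(input_str)
--     input_str = list(input_str)
--
--     for i in range(2, 2 ** len(input_str) - 1, 2):
--         b = bin(i)[2:]
--         pattern = list('0' * (len(input_str) - len(b)) + b)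
--
--         result.append(get_pattern(input_str, pattern))
--     return result
-- ===== SOURCE B (Python) =====
-- def space_pattern(input_str):
--     # DFS over character positions: at each gap choose "no space" before "space".
--     if not input_str:
--         return ['']
--     n = len(input_str)
--
--     def dfs(index, prefix):
--         prefix += input_str[index]
--         if index == n - 1:
--             return [prefix]
--         return dfs(index + 1, prefix) + dfs(index + 1, prefix + ' ')
--
--     return dfs(0, '')
-- ===== Notes on version B (the rewrite author's own statement) =====
-- stated objective: simpler
-- what changed: Replaces the loop over even integers with binary decoding and zero-padding by a direct recursive DFS over character positions that shares prefixes and takes the no-space branch before the space branch.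
import Mathlib
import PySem

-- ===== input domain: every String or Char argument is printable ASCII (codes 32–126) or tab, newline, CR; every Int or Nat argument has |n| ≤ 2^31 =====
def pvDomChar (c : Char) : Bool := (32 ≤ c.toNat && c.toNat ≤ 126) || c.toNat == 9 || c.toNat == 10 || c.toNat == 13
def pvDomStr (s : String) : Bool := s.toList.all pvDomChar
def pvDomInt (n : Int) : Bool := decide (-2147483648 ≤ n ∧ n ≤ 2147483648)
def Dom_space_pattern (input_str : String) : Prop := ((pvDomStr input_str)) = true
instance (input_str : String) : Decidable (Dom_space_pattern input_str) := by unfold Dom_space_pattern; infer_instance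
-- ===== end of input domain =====

-- B replaces A's loop over even integers with binary decoding/zero-padding by a
-- prefix-sharing recursive DFS over character positions (objective: simpler).

-- ===== PORT A =====
-- helper get_pattern: res = ''; for i in range(len(pattern)): res += input_str[i] (+ ' ' if bit).
-- Indexing uses List.getD: both indexed lists have length len(pattern) (Python's assert), so
-- every access is in range and the default is never used — exact on all call sites.
def get_pattern (input_str pattern : List Char) : String :=
  (List.range pattern.length).foldl
    (fun res i =>
      if pattern.getD i ' ' = '1' then (res.push (input_str.getD i ' ')).push ' '
      else res.push (input_str.getD i ' ')) ""

-- input_str = list(input_str) is input_str.toList; b = bin(i)[2:] is (toBinChars0b i).drop 2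
-- (every i produced by the range is ≥ 2, so dropping the "0b" prefix is exact);
-- pattern = '0' * (len - len(b)) + b is the List.replicate ++ below.
def space_pattern (input_str : String) : List String :=
  (PySem.List.pyRange 2 ((2 : Int) ^ input_str.toList.length - 1) 2).foldl
    (fun result i =>
      result ++ [get_pattern input_str.toList
        (List.replicate (input_str.toList.length - ((PySem.Int.toBinChars0b i).drop 2).length) '0'
          ++ (PySem.Int.toBinChars0b i).drop 2)])
    [input_str]

-- ===== PORT B =====
-- dfs over the remaining characters; acc is the accumulated prefix (already holding s[:index]).
def dfsB : List Char → String → List String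
  | [], acc => [acc]                         -- never reached: space_pattern_alt calls it on nonempty lists
  | [c], acc => [acc.push c]                 -- index == n - 1: emit the finished string
  | c :: c' :: rest, acc =>
      dfsB (c' :: rest) (acc.push c) ++ dfsB (c' :: rest) ((acc.push c).push ' ')

def space_pattern_alt (input_str : String) : List String :=
  if input_str.toList = [] then [""]
  else dfsB input_str.toList ""

-- ===== PRECONDITION & SPEC =====
def Spec_space_pattern (input_str : String) (out : List String) : Prop := out = space_pattern_alt input_str
instance (input_str : String) (out : List String) : Decidable (Spec_space_pattern input_str out) := by unfold Spec_space_pattern; infer_instance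

-- ===== CLAIM (what is proved, stated in full; the proofs are below) =====
def Claim_equal_space_pattern : Prop := ∀ (input_str : String), Dom_space_pattern input_str → Spec_space_pattern input_str (space_pattern input_str)

-- ===== LEMMAS AND PROOFS =====

-- fixed-width binary, MSB first, width n, of m (digits of m mod 2^n)
def binN : Nat → Nat → List Char
  | 0, _ => []
  | n + 1, m => binN n (m / 2) ++ [Nat.digitChar (m % 2)]

-- bin(m)[2:] for m ≥ 1, as a structural recursion (spec for Nat.toDigits 2)
def pyBinGo (m : Nat) : List Char :=
  if m = 0 then [] else pyBinGo (m / 2) ++ [Nat.digitChar (m % 2)]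
  decreasing_by exact Nat.div_lt_self (Nat.pos_of_ne_zero (by assumption)) (by norm_num)

-- semantic get_pattern on char lists
def pattL : List Char → List Char → List Char
  | c :: cs, b :: bs => (if b = '1' then [c, ' '] else [c]) ++ pattL cs bs
  | _, _ => []

theorem binN_length (n m : Nat) : (binN n m).length = n := by
  induction n generalizing m with
  | zero => rfl
  | succ n ih => simp [binN, ih]

theorem binN_zero (n : Nat) : binN n 0 = List.replicate n '0' := by
  induction n with
  | zero => rfl
  | succ n ih => rw [List.replicate_succ']; simp [binN, ih]; rfl

theorem toDigitsCore_eq (fuel m : Nat) (acc : List Char) (hm : 0 < m) (hf : m < fuel) :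
    Nat.toDigitsCore 2 fuel m acc = pyBinGo m ++ acc := by
  induction fuel generalizing m acc with
  | zero => omega
  | succ fuel ih =>
    rw [Nat.toDigitsCore]
    by_cases h : m / 2 = 0
    · have : m = 1 := by omega
      subst this
      simp [pyBinGo]
    · simp only [h, if_false]
      rw [ih (m / 2) _ (by omega) (by omega)]
      conv_rhs => rw [pyBinGo, if_neg (by omega : ¬ m = 0)]
      simp

theorem pad_pyBinGo (n : Nat) : ∀ m, 0 < m → m < 2 ^ n →
    List.replicate (n - (pyBinGo m).length) '0' ++ pyBinGo m = binN n m := by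
  induction n with
  | zero => intro m h1 h2; omega
  | succ n ih =>
    intro m h1 h2
    by_cases hm : m = 1
    · subst hm
      have hone : pyBinGo 1 = ['1'] := by rw [pyBinGo]; simp [pyBinGo, Nat.digitChar]
      have hdig : Nat.digitChar (1 % 2) = '1' := by decide
      rw [hone, binN, binN_zero, hdig]
      simp
    · have h2' : m / 2 < 2 ^ n := by
        have : 2 ^ (n + 1) = 2 * 2 ^ n := by ring
        omega
      have h1' : 0 < m / 2 := by omega
      have := ih (m / 2) h1' h2'
      conv_lhs => rw [pyBinGo, if_neg (by omega : ¬ m = 0)]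
      rw [binN]
      rw [← this]
      have hlen : (pyBinGo (m / 2) ++ [Nat.digitChar (m % 2)]).length = (pyBinGo (m / 2)).length + 1 := by simp
      rw [hlen]
      have : n + 1 - ((pyBinGo (m / 2)).length + 1) = n - (pyBinGo (m / 2)).length := by omega
      rw [this, List.append_assoc]

theorem binN_lo (w : Nat) : ∀ m, m < 2 ^ w → binN (w + 1) m = '0' :: binN w m := by
  induction w with
  | zero => intro m hm; interval_cases m; rfl
  | succ w ih =>
    intro m hm
    have h2 : m / 2 < 2 ^ w := by
      have : 2 ^ (w + 1) = 2 * 2 ^ w := by ring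
      omega
    show binN (w + 1) (m / 2) ++ [Nat.digitChar (m % 2)] = '0' :: binN (w + 1) m
    rw [ih (m / 2) h2]
    rfl

theorem binN_hi (w : Nat) : ∀ m, m < 2 ^ w → binN (w + 1) (2 ^ w + m) = '1' :: binN w m := by
  induction w with
  | zero => intro m hm; interval_cases m; rfl
  | succ w ih =>
    intro m hm
    have hp : 2 ^ (w + 1) = 2 * 2 ^ w := by ring
    have hdiv : (2 ^ (w + 1) + m) / 2 = 2 ^ w + m / 2 := by omega
    have hmod : (2 ^ (w + 1) + m) % 2 = m % 2 := by omega
    show binN (w + 1) ((2 ^ (w + 1) + m) / 2) ++ [Nat.digitChar ((2 ^ (w + 1) + m) % 2)]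
        = '1' :: binN (w + 1) m
    rw [hdiv, hmod, ih (m / 2) (by omega)]
    rfl

theorem pattL_replicate_zero (cs : List Char) : pattL cs (List.replicate cs.length '0') = cs := by
  induction cs with
  | nil => rfl
  | cons c cs ih => simp [pattL, List.replicate_succ, ih]

theorem get_pattern_aux (bs : List Char) : ∀ cs (init : String), bs.length = cs.length →
    ((List.range bs.length).foldl
      (fun res i =>
        if bs.getD i ' ' = '1' then (res.push (cs.getD i ' ')).push ' '
        else res.push (cs.getD i ' ')) init).toList = init.toList ++ pattL cs bs := by
  induction bs with
  | nil =>
    intro cs init h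
    have : cs = [] := by simpa using h.symm
    subst this
    simp [pattL]
  | cons b bs ih =>
    intro cs init h
    match cs with
    | [] => simp at h
    | c :: cs =>
      have h' : bs.length = cs.length := by simpa using h
      rw [show (b :: bs).length = bs.length + 1 from rfl,
          List.range_succ_eq_map, List.foldl_cons, List.foldl_map]
      have hfun : (fun (res : String) (i : Nat) =>
          if (b :: bs).getD (i + 1) ' ' = '1' then (res.push ((c :: cs).getD (i + 1) ' ')).push ' '
          else res.push ((c :: cs).getD (i + 1) ' '))
          = (fun res i =>
          if bs.getD i ' ' = '1' then (res.push (cs.getD i ' ')).push ' '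
          else res.push (cs.getD i ' ')) := by
        funext res i
        simp
      simp only [List.getD_cons_zero, hfun]
      rw [ih cs _ h']
      by_cases hb : b = '1' <;> simp [hb, pattL, String.toList_push]

theorem get_pattern_toList (cs bs : List Char) (h : bs.length = cs.length) :
    (get_pattern cs bs).toList = pattL cs bs := by
  have := get_pattern_aux bs cs "" h
  simpa [get_pattern] using this

theorem dfsB_eq (cs : List Char) : ∀ (acc : String), cs ≠ [] →
    (dfsB cs acc).map String.toList =
      (List.range (2 ^ (cs.length - 1))).map
        (fun k => acc.toList ++ pattL cs (binN (cs.length - 1) k ++ ['0'])) := by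
  induction cs with
  | nil => intro acc h; exact absurd rfl h
  | cons c cs ih =>
    intro acc _
    match cs, ih with
    | [], _ =>
      simp [dfsB, pattL, binN, String.toList_push]
    | c' :: rest, ih =>
      set cs := c' :: rest with hcs
      have hne : cs ≠ [] := by simp [hcs]
      have hr : 1 ≤ cs.length := by simp [hcs]
      have hlen : (c :: cs).length - 1 = cs.length := by simp
      have hsplit : 2 ^ cs.length = 2 ^ (cs.length - 1) + 2 ^ (cs.length - 1) := by
        have h1 : cs.length - 1 + 1 = cs.length := by omega
        calc 2 ^ cs.length = 2 ^ (cs.length - 1 + 1) := by rw [h1]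
          _ = 2 ^ (cs.length - 1) + 2 ^ (cs.length - 1) := by ring
      rw [show dfsB (c :: cs) acc
            = dfsB cs (acc.push c) ++ dfsB cs ((acc.push c).push ' ') from rfl]
      rw [List.map_append, ih (acc.push c) hne, ih ((acc.push c).push ' ') hne]
      rw [hlen, hsplit, List.range_add, List.map_append, List.map_map]
      congr 1
      · apply List.map_congr_left
        intro k hk
        have hk' : k < 2 ^ (cs.length - 1) := List.mem_range.mp hk
        have : binN cs.length k = '0' :: binN (cs.length - 1) k := by
          have h1 : cs.length = (cs.length - 1) + 1 := by omega
          conv_lhs => rw [h1]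
          exact binN_lo _ k hk'
        rw [this]
        simp [pattL, String.toList_push]
      · apply List.map_congr_left
        intro k hk
        have hk' : k < 2 ^ (cs.length - 1) := List.mem_range.mp hk
        have : binN cs.length (2 ^ (cs.length - 1) + k) = '1' :: binN (cs.length - 1) k := by
          have h1 : cs.length = (cs.length - 1) + 1 := by omega
          conv_lhs => rw [h1]
          exact binN_hi _ k hk'
        simp only [Function.comp]
        rw [this]
        simp [pattL, String.toList_push]

-- A's range of even pattern numbers, rewritten as a plain Nat range
theorem pyRange_even (N : Nat) (hN : 1 ≤ N) :
    PySem.List.pyRange 2 ((2 : Int) ^ N - 1) 2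
      = (List.range (2 ^ (N - 1) - 1)).map (fun k : Nat => 2 + 2 * (k : Int)) := by
  rw [PySem.List.pyRange_of_pos 2 ((2 : Int) ^ N - 1) (by norm_num : (0 : Int) < 2)]
  suffices h : (if (2 : Int) < 2 ^ N - 1 then (((2 : Int) ^ N - 1 - 2 + 2 - 1) / 2).toNat else 0)
      = 2 ^ (N - 1) - 1 by rw [h]
  obtain ⟨P, hP, hPpow⟩ : ∃ P : Nat, 1 ≤ P ∧ 2 ^ (N - 1) = P := ⟨2 ^ (N - 1), Nat.one_le_two_pow, rfl⟩
  have hpow : (2 : Int) ^ N = 2 * (P : Int) := by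
    have h1 : N = (N - 1) + 1 := by omega
    rw [h1, pow_succ, mul_comm]
    norm_cast
    omega
  rw [hPpow, hpow]
  by_cases h : (2 : Int) < 2 * (P : Int) - 1
  · rw [if_pos h]
    have harg : 2 * (P : Int) - 1 - 2 + 2 - 1 = 2 * ((P : Int) - 1) := by ring
    rw [harg, Int.mul_ediv_cancel_left _ (by norm_num)]
    omega
  · rw [if_neg h]
    omega

-- the body of A's loop, evaluated at i = 2m with 1 ≤ m < 2^(N-1), N = cs.length
theorem loop_body_eq (cs : List Char) (m : Nat) (hm1 : 1 ≤ m)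
    (hm2 : m < 2 ^ (cs.length - 1)) (hN : 1 ≤ cs.length) :
    (get_pattern cs
      (List.replicate (cs.length - ((PySem.Int.toBinChars0b (2 * (m : Int))).drop 2).length) '0'
        ++ (PySem.Int.toBinChars0b (2 * (m : Int))).drop 2)).toList
    = pattL cs (binN (cs.length - 1) m ++ ['0']) := by
  have hcast : (2 * (m : Int)) = ((2 * m : Nat) : Int) := by push_cast; ring
  have hb : (PySem.Int.toBinChars0b (2 * (m : Int))).drop 2 = Nat.toDigits 2 (2 * m) := by
    rw [hcast, PySem.Int.toBinChars0b, if_neg (by omega : ¬ ((2 * m : Nat) : Int) < 0)]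
    simp only [List.drop_succ_cons, List.drop_zero, Int.toNat_natCast]
  have hdig : Nat.toDigits 2 (2 * m) = pyBinGo (2 * m) := by
    rw [Nat.toDigits]
    rw [toDigitsCore_eq (2 * m + 1) (2 * m) [] (by omega) (by omega)]
    simp
  have hpow : 2 * m < 2 ^ cs.length := by
    have h1 : cs.length = (cs.length - 1) + 1 := by omega
    rw [h1, pow_succ]
    omega
  have hpad : List.replicate (cs.length - (pyBinGo (2 * m)).length) '0' ++ pyBinGo (2 * m)
      = binN cs.length (2 * m) := pad_pyBinGo cs.length (2 * m) (by omega) hpow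
  have hbin : binN cs.length (2 * m) = binN (cs.length - 1) m ++ ['0'] := by
    have h1 : cs.length = (cs.length - 1) + 1 := by omega
    conv_lhs => rw [h1]
    show binN (cs.length - 1) (2 * m / 2) ++ [Nat.digitChar (2 * m % 2)]
        = binN (cs.length - 1) m ++ ['0']
    congr 2
    · omega
    · have : 2 * m % 2 = 0 := by omega
      rw [this]; rfl
  rw [hb, hdig, hpad, hbin]
  apply get_pattern_toList
  simp [binN_length]
  omega

theorem string_toList_injective : Function.Injective String.toList :=
  fun _ _ h => String.toList_inj.mp h

-- ===== VERDICT (by name: the statement is the Claim_ definition above) =====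
theorem space_pattern_spec : Claim_equal_space_pattern := by
  intro input_str _
  unfold Spec_space_pattern space_pattern space_pattern_alt
  by_cases hnil : input_str.toList = []
  · simp only [hnil]
    have hs : input_str = "" := string_toList_injective (by simp [hnil])
    subst hs
    have h0 : PySem.List.pyRange 2 ((2 : Int) ^ ([] : List Char).length - 1) 2 = [] := by
      rw [PySem.List.pyRange_of_pos 2 _ (by norm_num : (0 : Int) < 2)]
      simp
    rw [h0]
    rfl
  · rw [if_neg hnil]
    set cs := input_str.toList with hcs
    have hN : 1 ≤ cs.length := List.length_pos_of_ne_nil hnil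
    apply List.map_injective_iff.mpr string_toList_injective
    rw [dfsB_eq cs "" hnil]
    rw [PySem.List.foldl_append_singleton_eq_map
      (fun i => get_pattern cs
        (List.replicate (cs.length - ((PySem.Int.toBinChars0b i).drop 2).length) '0'
          ++ (PySem.Int.toBinChars0b i).drop 2))]
    rw [pyRange_even cs.length hN]
    rw [List.map_append, List.map_singleton, List.map_map]
    have hsplit : 2 ^ (cs.length - 1) = 1 + (2 ^ (cs.length - 1) - 1) := by
      have : 1 ≤ 2 ^ (cs.length - 1) := Nat.one_le_two_pow
      omega
    conv_rhs => rw [hsplit, List.range_add, List.map_append]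
    congr 1
    · -- head: the original string is pattern 0
      rw [show List.range 1 = [0] by rfl, List.map_singleton]
      have hb0 : binN (cs.length - 1) 0 ++ ['0'] = List.replicate cs.length '0' := by
        rw [binN_zero, ← List.replicate_succ']
        congr 1
        omega
      rw [hb0, pattL_replicate_zero]
      simp [hcs]
    · -- tail: loop item at i = 2 + 2k is DFS item 1 + k
      rw [List.map_map]
      rw [List.map_map]
      apply List.map_congr_left
      intro k hk
      have hk' : k < 2 ^ (cs.length - 1) - 1 := List.mem_range.mp hk
      simp only [Function.comp]
      have h2 : (2 : Int) + 2 * (k : Int) = 2 * ((k + 1 : Nat) : Int) := by push_cast; ring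
      rw [h2, loop_body_eq cs (k + 1) (by omega) (by omega) hN]
      simp [Nat.add_comm]
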